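-- pv_equiv track=rewrite | github.com/pypi-data/pypi-mirror-42 | packages/ducktoolkit/ducktoolkit-1.0.2.tar.gz/ducktoolkit-1.0.2/ducktoolkit/encoder.py | add_delay
-- ===== SOURCE A (Python) =====
-- def add_delay(delay_value):
--
--     delay_return = ''
--
--     # divide by 255 add that many 0xff
--     # convert the reminder to hex
--     # e.g. 750 = FF FF F0
--     while delay_value > 0:
--         if delay_value > 255:
--             delay_return += '00FF'
--             delay_value -= 255
--         else:
--             _delay = hex(delay_value)[2:].zfill(2)
--             delay_return += '00{0}'.format(str(_delay))
--             delay_value = 0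
--     return delay_return
-- ===== SOURCE B (Python) =====
-- def add_delay(delay_value):
--     # Closed form: k full 0xFF blocks, remainder r in 1..255 (lowercase hex tail).
--     if delay_value <= 0:
--         return ''
--     k = (delay_value - 1) // 255
--     r = delay_value - 255 * k
--     return '00FF' * k + '00' + hex(r)[2:].zfill(2)
-- ===== Notes on version B (the rewrite author's own statement) =====
-- stated objective: simpler
-- what changed: Replaced the subtract-255-per-iteration while loop by a closed-form block count k=(n-1)//255 with remainder r=n-255k, building '00FF'*k plus one lowercase-hex tail.
import Mathlib
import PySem

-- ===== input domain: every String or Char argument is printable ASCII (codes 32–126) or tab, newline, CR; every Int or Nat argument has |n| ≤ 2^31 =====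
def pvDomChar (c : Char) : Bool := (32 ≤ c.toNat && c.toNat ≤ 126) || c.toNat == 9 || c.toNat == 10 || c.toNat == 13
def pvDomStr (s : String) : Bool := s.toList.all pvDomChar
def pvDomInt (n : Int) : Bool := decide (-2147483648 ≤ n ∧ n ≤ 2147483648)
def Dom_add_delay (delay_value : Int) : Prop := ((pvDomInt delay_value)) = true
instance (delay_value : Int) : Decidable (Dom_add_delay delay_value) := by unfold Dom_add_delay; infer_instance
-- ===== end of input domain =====

-- B replaces A's subtract-255-at-a-time loop by a closed-form block count (simpler; no loop).

-- hex(n)[2:].zfill(2): exact for 0 ≤ n ≤ 255 (both Pythons only call it with 1 ≤ n ≤ 255)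
def pvHexDigit (n : Nat) : Char := if n < 10 then Char.ofNat (48 + n) else Char.ofNat (87 + n)
def pvHex2 (n : Int) : String :=
  if n < 16 then String.ofList ['0', pvHexDigit n.toNat]
  else String.ofList [pvHexDigit (n.toNat / 16), pvHexDigit (n.toNat % 16)]

-- ===== PORT A =====
-- the while-loop of A, state = (delay_return, delay_value)
def add_delay_loop (delay_return : String) (delay_value : Int) : String :=
  if _h : delay_value > 0 then
    if delay_value > 255 then add_delay_loop (delay_return ++ "00FF") (delay_value - 255)
    else delay_return ++ ("00" ++ pvHex2 delay_value)
  else delay_return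
termination_by delay_value.toNat
decreasing_by omega

def add_delay (delay_value : Int) : String := add_delay_loop "" delay_value

-- ===== PORT B =====
-- '00FF' * k
def pvRepFF (k : Nat) : String :=
  match k with
  | 0 => ""
  | k + 1 => "00FF" ++ pvRepFF k

def add_delay_alt (delay_value : Int) : String :=
  if delay_value ≤ 0 then ""
  else
    let k := PySem.Int.floordiv (delay_value - 1) 255
    let r := delay_value - 255 * k
    pvRepFF k.toNat ++ ("00" ++ pvHex2 r)

-- ===== PRECONDITION & SPEC =====
def Spec_add_delay (delay_value : Int) (out : String) : Prop := out = add_delay_alt delay_value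
instance (delay_value : Int) (out : String) : Decidable (Spec_add_delay delay_value out) := by unfold Spec_add_delay; infer_instance

-- ===== CLAIM (what is proved, stated in full; the proofs are below) =====
def Claim_equal_add_delay : Prop := ∀ (delay_value : Int), Dom_add_delay delay_value → Spec_add_delay delay_value (add_delay delay_value)

-- ===== LEMMAS AND PROOFS =====

lemma add_delay_loop_eq_aux (n : Nat) : ∀ (dv : Int) (acc : String), dv.toNat ≤ n → 0 < dv →
    add_delay_loop acc dv =
      acc ++ (pvRepFF (PySem.Int.floordiv (dv - 1) 255).toNat ++
        ("00" ++ pvHex2 (dv - 255 * PySem.Int.floordiv (dv - 1) 255))) := by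
  induction n with
  | zero => intro dv acc hn hpos; omega
  | succ n ih =>
    intro dv acc hn hpos
    rw [add_delay_loop]
    rw [PySem.Int.floordiv_eq_ediv_of_pos (by omega : (0:Int) < 255)]
    by_cases h255 : dv > 255
    · have hlt : dv - 255 < dv := by omega
      rw [dif_pos hpos, if_pos h255, ih (dv - 255) _ (by omega) (by omega)]
      rw [PySem.Int.floordiv_eq_ediv_of_pos (by omega : (0:Int) < 255)]
      have hk : (dv - 1) / 255 = (dv - 255 - 1) / 255 + 1 := by omega
      have hk0 : 0 < (dv - 1) / 255 := by omega
      rw [hk]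
      have hrep : ((dv - 255 - 1) / 255 + 1).toNat = ((dv - 255 - 1) / 255).toNat + 1 := by omega
      rw [hrep]
      show (acc ++ "00FF") ++ _ = acc ++ (pvRepFF (((dv - 255 - 1)/255).toNat + 1) ++ _)
      have hr : dv - 255 * ((dv - 255 - 1) / 255 + 1) = dv - 255 - 255 * ((dv - 255 - 1) / 255) := by ring
      rw [hr]
      simp [pvRepFF, String.append_assoc]
    · have hk : (dv - 1) / 255 = 0 := by omega
      rw [dif_pos hpos, if_neg h255, hk]
      norm_num [pvRepFF]

-- ===== VERDICT (by name: the statement is the Claim_ definition above) =====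
theorem add_delay_spec : Claim_equal_add_delay := by
  intro dv _
  unfold Spec_add_delay add_delay add_delay_alt
  by_cases h : dv ≤ 0
  · rw [if_pos h, add_delay_loop, dif_neg (by omega : ¬ dv > 0)]
  · rw [if_neg h, add_delay_loop_eq_aux dv.toNat dv "" (le_refl _) (by omega)]
    simp
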